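-- pv_equiv track=rewrite | github.com/observerkei/aimi | core/memory.py | make_history
-- ===== SOURCE A (Python) =====
-- from typing import List, Union, Any, Dict
--
-- def make_history(
--
--     talk_history: List[Dict]
-- ) -> str:
--     history = ''
--
--     talk_count = 0
--     for talk in talk_history:
--         content = ''
--         it = ''
--         for k, v in talk.items():
--             if k == 'role' and v == 'user':
--                 talk_count += 1
--                 it = '我说:'
--                 continue
--             if k == 'role' and v == 'assistant':
--                 it = '你说:'
--             if k != 'content':
--                 continue
--             content = v
--         history += f'{talk_count} {it} {content}\n'
--     # todo
--     return history
-- ===== SOURCE B (Python) =====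
-- def make_history(talk_history):
--     roles = [t.get('role') for t in talk_history]
--     labels = {'user': '我说:', 'assistant': '你说:'}
--     return ''.join(
--         f"{roles[:i + 1].count('user')} {labels.get(r, '')} {t.get('content', '')}\n"
--         for i, (t, r) in enumerate(zip(talk_history, roles))
--     )
-- ===== Notes on version B (the rewrite author's own statement) =====
-- stated objective: alternative
-- what changed: B is staged instead of stateful: it first projects the role of every talk into a list, then emits each line statelessly, re-deriving the counter as a prefix count over the role list and taking the label from a lookup table, joining once at the end - A's single pass with an inner key-scan, continue flags, a running counter and string concatenation disappears; Pre_ excludes talks whose association-list encoding has duplicate keys, which no real Python dict can have (A's last-write key scan and B's first-match lookup would disagree there).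
import Mathlib
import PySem

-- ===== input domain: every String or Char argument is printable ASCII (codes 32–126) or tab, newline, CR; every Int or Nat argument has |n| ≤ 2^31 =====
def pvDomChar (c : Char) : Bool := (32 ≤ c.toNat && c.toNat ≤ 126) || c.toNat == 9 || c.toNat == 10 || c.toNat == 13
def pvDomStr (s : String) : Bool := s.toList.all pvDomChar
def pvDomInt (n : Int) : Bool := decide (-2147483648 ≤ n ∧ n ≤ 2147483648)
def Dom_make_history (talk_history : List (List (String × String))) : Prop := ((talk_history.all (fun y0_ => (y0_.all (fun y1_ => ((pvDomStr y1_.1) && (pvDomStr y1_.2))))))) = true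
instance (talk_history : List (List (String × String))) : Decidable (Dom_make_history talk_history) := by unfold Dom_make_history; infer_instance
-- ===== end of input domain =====

-- B replaces A's single stateful pass (inner key-scan with continue flags, a running counter
-- and growing string concatenation) by staged passes: project the roles first, then emit each
-- line statelessly — the counter is re-derived as a prefix count over the role list and the
-- label read from a table (objective: alternative; B trades the running state for prefix counts).

-- ===== PORT A =====
-- inner loop body of A: 'for k, v in talk.items(): ...' over the state (content, it, talk_count)
def pvStepInner (st : String × String × Int) (kv : String × String) : String × String × Int :=
  if kv.1 = "role" ∧ kv.2 = "user" then (st.1, "我说:", st.2.2 + 1)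
  else
    let it := if kv.1 = "role" ∧ kv.2 = "assistant" then "你说:" else st.2.1
    if kv.1 ≠ "content" then (st.1, it, st.2.2)
    else (kv.2, it, st.2.2)

def make_history (talk_history : List (List (String × String))) : String :=
  (talk_history.foldl (fun (st : String × Int) talk =>
      let r := talk.foldl pvStepInner ("", "", st.2)
      (st.1 ++ (PySem.Int.toStr r.2.2 ++ " " ++ r.2.1 ++ " " ++ r.1 ++ "\n"), r.2.2))
    ("", 0)).1

-- ===== PORT B =====
-- labels = {'user': '我说:', 'assistant': '你说:'}
def pvLabels : PySem.Dict String String := PySem.Dict.mk [("user", "我说:"), ("assistant", "你说:")]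

-- labels.get(r, '') — r is an Option (talk.get('role')); a missing role matches no key
def pvLabelGet : Option String → String
  | some v => pvLabels.getD v ""
  | none => ""

def make_history_alt (talk_history : List (List (String × String))) : String :=
  let roles := talk_history.map (List.lookup "role")
  PySem.Str.join ""
    ((PySem.List.enumerate (talk_history.zip roles)).map (fun p =>
      PySem.Int.toStr ((PySem.List.count (PySem.List.slice roles none (some (p.1 + 1))) (some "user") : Int))
        ++ " " ++ pvLabelGet p.2.2 ++ " " ++ ((List.lookup "content" p.2.1).getD "") ++ "\n"))

-- ===== PRECONDITION & SPEC =====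
-- Pre_ excludes talks whose association-list encoding carries a duplicate key: a Python dict can
-- never have duplicate keys, so such lists encode no input the Python A accepts (and on them A's
-- last-write key scan and B's first-match lookup are equally arbitrary readings).
def Pre_make_history (talk_history : List (List (String × String))) : Prop :=
  ∀ talk ∈ talk_history, (talk.map Prod.fst).Nodup
instance (talk_history : List (List (String × String))) : Decidable (Pre_make_history talk_history) := by unfold Pre_make_history; infer_instance
def pvWitness_make_history : (List (List (String × String))) :=
  [[("role", "user"), ("content", "hi")], [("role", "assistant"), ("content", "ok")]]
def Spec_make_history (talk_history : List (List (String × String))) (out : String) : Prop := out = make_history_alt talk_history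
instance (talk_history : List (List (String × String))) (out : String) : Decidable (Spec_make_history talk_history out) := by unfold Spec_make_history; infer_instance

-- ===== CLAIM (what is proved, stated in full; the proofs are below) =====
def Claim_equal_make_history : Prop := ∀ (talk_history : List (List (String × String))), Dom_make_history talk_history → Pre_make_history talk_history → Spec_make_history talk_history (make_history talk_history)

-- ===== LEMMAS AND PROOFS =====

theorem pv_lookup_eq_none {l : List (String × String)} {k : String}
    (h : k ∉ l.map Prod.fst) : List.lookup k l = none := by
  induction l with
  | nil => rfl
  | cons p rest ih =>
    simp only [List.map_cons, List.mem_cons, not_or] at h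
    have hb : (k == p.1) = false := by simp [h.1]
    simp [List.lookup, hb, ih h.2]

-- the value A's 'it' flag holds after the key scan, as a function of the 'role' lookup
def pvRoleIt (o : Option String) (it : String) : String :=
  match o with
  | some v => if v = "user" then "我说:" else if v = "assistant" then "你说:" else it
  | none => it

theorem pv_inner_eq (talk : List (String × String)) (h : (talk.map Prod.fst).Nodup)
    (c it : String) (tc : Int) :
    talk.foldl pvStepInner (c, it, tc) =
      ((List.lookup "content" talk).getD c,
       pvRoleIt (List.lookup "role" talk) it,
       tc + (if List.lookup "role" talk = some "user" then 1 else 0)) := by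
  induction talk generalizing c it tc with
  | nil => simp [pvRoleIt]
  | cons kv rest ih =>
    obtain ⟨k, v⟩ := kv
    simp only [List.map_cons, List.nodup_cons] at h
    obtain ⟨hk, hrest⟩ := h
    by_cases hkr : k = "role"
    · subst hkr
      have hnone : List.lookup "role" rest = none := pv_lookup_eq_none hk
      have hcr : ("content" == "role") = false := by decide
      by_cases hvu : v = "user"
      · subst hvu
        simp [List.foldl_cons, pvStepInner, ih hrest, List.lookup, hnone, hcr, pvRoleIt]
      · by_cases hva : v = "assistant"
        · subst hva
          simp [List.foldl_cons, pvStepInner, hvu, ih hrest, List.lookup, hnone, hcr, pvRoleIt]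
        · simp [List.foldl_cons, pvStepInner, hvu, hva, ih hrest, List.lookup, hnone, hcr,
            pvRoleIt]
    · have hr : ("role" == k) = false := by simp [Ne.symm hkr]
      by_cases hkc : k = "content"
      · subst hkc
        have hnone : List.lookup "content" rest = none := pv_lookup_eq_none hk
        simp [List.foldl_cons, pvStepInner, hkr, ih hrest, List.lookup, hnone, hr]
      · have hc : ("content" == k) = false := by simp [Ne.symm hkc]
        simp [List.foldl_cons, pvStepInner, hkr, hkc, ih hrest, List.lookup, hr, hc]

-- common reference form: the line a talk emits and the updated counter
def pvLineSpec (talk : List (String × String)) (tc : Int) : String × Int :=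
  let tc' := tc + (if List.lookup "role" talk = some "user" then 1 else 0)
  (PySem.Int.toStr tc' ++ " " ++ pvRoleIt (List.lookup "role" talk) "" ++ " " ++
    ((List.lookup "content" talk).getD "") ++ "\n", tc')

-- the lines of a suffix together with the final counter
def pvLines : List (List (String × String)) → Int → List String × Int
  | [], tc => ([], tc)
  | talk :: rest, tc =>
    let l := pvLineSpec talk tc
    let r := pvLines rest l.2
    (l.1 :: r.1, r.2)

def pvConcat : List String → String
  | [] => ""
  | x :: r => x ++ pvConcat r

theorem pv_a_line (talk : List (String × String)) (h : (talk.map Prod.fst).Nodup) (tc : Int) :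
    (PySem.Int.toStr (talk.foldl pvStepInner ("", "", tc)).2.2 ++ " " ++
       (talk.foldl pvStepInner ("", "", tc)).2.1 ++ " " ++
       (talk.foldl pvStepInner ("", "", tc)).1 ++ "\n",
     (talk.foldl pvStepInner ("", "", tc)).2.2) = pvLineSpec talk tc := by
  rw [pv_inner_eq talk h]
  simp [pvLineSpec]

theorem pv_a_fold (th : List (List (String × String)))
    (h : ∀ talk ∈ th, (talk.map Prod.fst).Nodup) (acc : String) (tc : Int) :
    th.foldl (fun (st : String × Int) talk =>
        let r := talk.foldl pvStepInner ("", "", st.2)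
        (st.1 ++ (PySem.Int.toStr r.2.2 ++ " " ++ r.2.1 ++ " " ++ r.1 ++ "\n"), r.2.2)) (acc, tc) =
      (acc ++ pvConcat ((pvLines th tc).1), (pvLines th tc).2) := by
  induction th generalizing acc tc with
  | nil => simp [pvLines, pvConcat]
  | cons talk rest ih =>
    have hline := pv_a_line talk (h talk (by simp)) tc
    have h1 := congrArg Prod.fst hline
    have h2 := congrArg Prod.snd hline
    simp only at h1 h2
    simp only [List.foldl_cons]
    rw [h1, h2]
    rw [ih (fun t ht => h t (by simp [ht]))]
    simp only [pvLines, pvConcat]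
    rw [String.append_assoc]

theorem pv_count_append_singleton (pre : List (Option String)) (x : Option String) :
    PySem.List.count (pre ++ [x]) (some "user") =
      PySem.List.count pre (some "user") + (if x = some "user" then 1 else 0) := by
  rw [PySem.List.count_eq, PySem.List.count_eq, List.count_append]
  by_cases hx : x = some "user" <;> simp [hx]

theorem pv_label_eq (o : Option String) : pvLabelGet o = pvRoleIt o "" := by
  cases o with
  | none => rfl
  | some v =>
    by_cases h1 : v = "user"
    · subst h1; decide
    · by_cases h2 : v = "assistant"
      · subst h2; decide
      · simp [pvLabelGet, pvRoleIt, h1, h2, pvLabels, PySem.Dict.getD_eq_get?_getD,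
          PySem.Dict.get?, Ne.symm h1, Ne.symm h2]

-- B's stateless prefix-count pass over a suffix, generalized by the roles already consumed
theorem pv_b_gen (th : List (List (String × String))) (pre : List (Option String)) :
    (PySem.List.enumerate (th.zip (th.map (List.lookup "role"))) (pre.length : Int)).map
      (fun p =>
        PySem.Int.toStr ((PySem.List.count
            (PySem.List.slice (pre ++ th.map (List.lookup "role")) none (some (p.1 + 1)))
            (some "user") : Int))
          ++ " " ++ pvLabelGet p.2.2 ++ " " ++ ((List.lookup "content" p.2.1).getD "") ++ "\n") =
      (pvLines th ((PySem.List.count pre (some "user") : Int))).1 := by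
  induction th generalizing pre with
  | nil => simp [pvLines]
  | cons talk rest ih =>
    simp only [List.map_cons, List.zip_cons_cons, PySem.List.enumerate_cons, List.map_cons]
    have hslice : PySem.List.slice (pre ++ List.lookup "role" talk :: rest.map (List.lookup "role"))
        none (some ((pre.length : Int) + 1)) = pre ++ [List.lookup "role" talk] := by
      have h1 : ((pre.length : Int) + 1) = ((pre.length + 1 : Nat) : Int) := by push_cast; ring
      rw [h1, PySem.List.slice_to_natCast, List.take_append]
      simp [List.take_of_length_le]
    have hpre1 : ((pre.length : Int) + 1) = (((pre ++ [List.lookup "role" talk]).length) : Int) := by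
      simp
    have hlist : pre ++ List.lookup "role" talk :: rest.map (List.lookup "role") =
        (pre ++ [List.lookup "role" talk]) ++ rest.map (List.lookup "role") := by simp
    refine congrArg₂ List.cons ?_ ?_
    · rw [hslice, pv_count_append_singleton, pv_label_eq]
      by_cases hu : List.lookup "role" talk = some "user" <;>
        simp [pvLineSpec, hu]
    · rw [hlist, hpre1, ih (pre ++ [List.lookup "role" talk])]
      rw [pv_count_append_singleton]
      by_cases hu : List.lookup "role" talk = some "user" <;>
        simp [pvLineSpec, hu]

theorem pv_join_empty (lines : List String) :
    PySem.Str.join "" lines = pvConcat lines := by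
  induction lines with
  | nil => rfl
  | cons x rest ih =>
    cases rest with
    | nil => simp [pvConcat, PySem.Str.join, PySem.Chars.join_singleton]
    | cons y r =>
      rw [pvConcat, ← ih]
      have : PySem.Str.join "" (x :: y :: r) = x ++ "" ++ PySem.Str.join "" (y :: r) := by
        simp only [PySem.Str.join, List.map_cons, PySem.Chars.join_cons_cons]
        rw [String.ofList_append, String.ofList_append, String.ofList_toList]
        rfl
      rw [this]
      simp

-- ===== VERDICT (by name: the statement is the Claim_ definition above) =====
theorem make_history_spec : Claim_equal_make_history := by
  intro th _ hpre
  unfold Spec_make_history make_history make_history_alt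
  rw [pv_a_fold th hpre "" 0]
  rw [pv_join_empty]
  have hb := pv_b_gen th []
  simp only [List.nil_append, List.length_nil, Nat.cast_zero] at hb
  rw [hb]
  simp [PySem.List.count]
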